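-- pv_equiv track=rewrite | github.com/jeromfernig/create_test_cards | mtg_test_cards/main.py | format_abilities
-- ===== SOURCE A (Python) =====
-- LOWEST_SIZE = 8
--
-- sizes_x = {
--     144:{40:5,
--          36:6,
--          32:7,
--          28:8,
--          24:9,
--          20:10,
--          16:13,
--          12:18,
--          8:25
--         },
--     456:{40:18,
--          36:20,
--          32:23,
--          28:25,
--          24:31,
--          20:36,
--          16:44,
--          12:63,
--          8:88
--         },
--     612:{40:24,
--          36:27,
--          32:31,
--          28:35,
--          24:42,
--          20:49,
--          16:60,
--          12:85,
--          8:119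
--         }
--     }
--
-- sizes_y = {
--     40:8,
--     36:9,
--     32:10,
--     28:12,
--     24:14,
--     20:16,
--     16:18,
--     12:24,
--     8:30
--     }
--
-- def format_abilities(text, size=40):
--     newtext = str(text)
--     # set max chars that fit on a single line
--     max_chars_x = sizes_x[612][size]
--     # replace some shorthands
--     newtext = newtext.replace("~", "CARDNAME")
--     newtext = newtext.replace("ETBs", "enters the battlefield")
--     # split abilities into separate abilities
--     newtext = newtext.split(". ")
--     # for each ability, split into words (del=" ")
--     words = []
--     for ability in newtext:
--         words.append(ability.split(" "))
--
--     # based on the max chars of a line of text: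
--         # fit words on separate lines of text
--
--     # for each word, first check whether len of that word would overflow the
--     # current line. If yes, add \n and set n_chars to 0. Then, add the word to
--     # the text plus a whitespace and add the chars to n_chars.
--     # After each ability, add \n and set n_chars to 0
--     result = ""
--     lines = 0
--     for ability in words:
--         n_chars = 0
--         for word in ability:
--             assert type(word) == type("")
--             if len(word) + n_chars > max_chars_x:
--                 result += "\n"
--                 lines += 1
--                 n_chars = 0
--             result += word + " "
--             n_chars += len(word) + 1
--         result += "\n"
--         lines += 1
--
--     # check if the amount of lines exceed the vertical size
--     # if yes:
--         # recur function with size = size - 1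
--     # if no:
--         # return formatted text and size
--
--     if lines > sizes_y[size] and size > LOWEST_SIZE:
--         return format_abilities(text, size=size-4)
--     else:
--         return result, size
-- ===== SOURCE B (Python) =====
-- LOWEST_SIZE = 8
--
-- # characters per line at 612px card width (= sizes_x[612] in the original)
-- CHARS_PER_LINE = {40: 24, 36: 27, 32: 31, 28: 35, 24: 42, 20: 49, 16: 60, 12: 85, 8: 119}
-- MAX_LINES = {40: 8, 36: 9, 32: 10, 28: 12, 24: 14, 20: 16, 16: 18, 12: 24, 8: 30}
--
--
-- def _chunk(words, max_chars):
--     """Greedily pack words into lines: a word opens a new line when it (plus the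
--     running count of word+space characters) would exceed max_chars."""
--     done, cur, n = [], [], 0
--     for w in words:
--         if len(w) + n > max_chars:
--             done.append(cur)
--             cur, n = [], 0
--         cur.append(w)
--         n += len(w) + 1
--     done.append(cur)
--     return done
--
--
-- def format_abilities(text, size=40):
--     abilities = [a.split(" ") for a in
--                  str(text).replace("~", "CARDNAME")
--                           .replace("ETBs", "enters the battlefield")
--                           .split(". ")]
--     while True:
--         chunked = [_chunk(a, CHARS_PER_LINE[size]) for a in abilities]
--         result = "".join("".join(w + " " for w in c) + "\n"
--                          for ch in chunked for c in ch)
--         if sum(len(ch) for ch in chunked) <= MAX_LINES[size] or size <= LOWEST_SIZE: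
--             return result, size
--         size -= 4
-- ===== Notes on version B (the rewrite author's own statement) =====
-- stated objective: alternative
-- what changed: The tail recursion over shrinking font sizes becomes an explicit loop with the replace/split preprocessing hoisted out of it, and the single-pass string/line-count accumulation is replaced by a two-phase wrap: greedily chunk each ability's words into a list of lines, then render the chunks with joins and count them with sum.
import Mathlib
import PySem

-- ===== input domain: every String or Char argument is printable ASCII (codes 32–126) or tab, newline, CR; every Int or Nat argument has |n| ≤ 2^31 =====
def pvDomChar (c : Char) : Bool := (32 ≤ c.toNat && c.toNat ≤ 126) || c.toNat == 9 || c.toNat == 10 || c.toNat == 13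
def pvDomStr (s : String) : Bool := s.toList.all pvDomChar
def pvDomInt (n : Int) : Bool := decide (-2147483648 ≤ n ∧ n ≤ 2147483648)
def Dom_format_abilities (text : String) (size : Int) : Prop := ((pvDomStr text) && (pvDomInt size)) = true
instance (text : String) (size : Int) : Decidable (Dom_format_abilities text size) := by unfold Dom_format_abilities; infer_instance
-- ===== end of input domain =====

-- B replaces A's re-wrap-inside-tail-recursion by a size loop over a two-phase wrap
-- (greedy chunking into a list of lines, then rendering/counting the chunks), with the
-- text preprocessing hoisted out of the loop (objective: alternative).

-- ===== PORT A =====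
-- the module constants sizes_x / sizes_y (dicts in insertion order)
def pvSizesX : PySem.Dict Int (PySem.Dict Int Int) :=
  PySem.Dict.ofList
    [(144, PySem.Dict.ofList [(40,5),(36,6),(32,7),(28,8),(24,9),(20,10),(16,13),(12,18),(8,25)]),
     (456, PySem.Dict.ofList [(40,18),(36,20),(32,23),(28,25),(24,31),(20,36),(16,44),(12,63),(8,88)]),
     (612, PySem.Dict.ofList [(40,24),(36,27),(32,31),(28,35),(24,42),(20,49),(16,60),(12,85),(8,119)])]

def pvSizesY : PySem.Dict Int Int :=
  PySem.Dict.ofList [(40,8),(36,9),(32,10),(28,12),(24,14),(20,16),(16,18),(12,24),(8,30)]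

-- A's inner word loop over one ability: state (result, lines, n_chars)
def pvAbilityA (maxc : Int) (st : List Char × Int × Int) (ws : List (List Char)) :
    List Char × Int × Int :=
  ws.foldl (fun st word =>
    let st := if (word.length : Int) + st.2.2 > maxc then (st.1 ++ ['\n'], st.2.1 + 1, (0 : Int)) else st
    (st.1 ++ word ++ [' '], st.2.1, st.2.2 + (word.length : Int) + 1)) st

-- A's outer loop over abilities: state (result, lines)
def pvWrapA (maxc : Int) (words : List (List (List Char))) : List Char × Int :=
  words.foldl (fun acc ability =>
    let inner := pvAbilityA maxc (acc.1, acc.2, 0) ability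
    (inner.1 ++ ['\n'], inner.2.1 + 1)) ([], 0)

-- strings are carried as List Char (PySem.Chars is exact there); sizes_x[612][size] /
-- sizes_y[size] are KeyErrors for size outside the table: those inputs are outside Pre_.
def format_abilities (text : String) (size : Int) : String × Int :=
  let maxc := (PySem.Dict.get? ((PySem.Dict.get? pvSizesX 612).getD PySem.Dict.empty) size).getD 0
  let t := PySem.Chars.replace text.toList "~".toList "CARDNAME".toList
  let t := PySem.Chars.replace t "ETBs".toList "enters the battlefield".toList
  let words := (PySem.Chars.splitOn t ". ".toList).map (fun ab => PySem.Chars.splitOn ab " ".toList)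
  let r := pvWrapA maxc words
  if _h : r.2 > (PySem.Dict.get? pvSizesY size).getD 0 ∧ size > 8 then
    format_abilities text (size - 4)
  else
    (String.ofList r.1, size)
termination_by (size - 8).toNat
decreasing_by omega

-- ===== PORT B =====
def pvCharsPerLine : PySem.Dict Int Int :=
  PySem.Dict.ofList [(40,24),(36,27),(32,31),(28,35),(24,42),(20,49),(16,60),(12,85),(8,119)]

def pvMaxLines : PySem.Dict Int Int :=
  PySem.Dict.ofList [(40,8),(36,9),(32,10),(28,12),(24,14),(20,16),(16,18),(12,24),(8,30)]

-- one step of B's _chunk loop: state (done, cur, n)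
def pvStepC (maxChars : Int) (st : List (List (List Char)) × List (List Char) × Int)
    (w : List Char) : List (List (List Char)) × List (List Char) × Int :=
  let st := if (w.length : Int) + st.2.2 > maxChars then (st.1 ++ [st.2.1], [], (0 : Int)) else st
  (st.1, st.2.1 ++ [w], st.2.2 + (w.length : Int) + 1)

-- B's _chunk: greedily pack words into lines
def pvChunk (ws : List (List Char)) (maxChars : Int) : List (List (List Char)) :=
  let st := ws.foldl (pvStepC maxChars) ([], [], 0)
  st.1 ++ [st.2.1]

-- B's while-True loop over shrinking sizes (chunk, render, count, test)
def pvLoopB (abilities : List (List (List Char))) (size : Int) : List Char × Int :=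
  let chunked := abilities.map (fun a => pvChunk a ((PySem.Dict.get? pvCharsPerLine size).getD 0))
  let result := PySem.Chars.join []
    (chunked.flatten.map (fun c => PySem.Chars.join [] (c.map (fun w => w ++ [' '])) ++ ['\n']))
  if _h : (chunked.map (fun ch => (ch.length : Int))).sum ≤ (PySem.Dict.get? pvMaxLines size).getD 0
          ∨ size ≤ 8 then
    (result, size)
  else
    pvLoopB abilities (size - 4)
termination_by (size - 8).toNat
decreasing_by omega

def format_abilities_alt (text : String) (size : Int) : String × Int :=
  let t := PySem.Chars.replace text.toList "~".toList "CARDNAME".toList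
  let t := PySem.Chars.replace t "ETBs".toList "enters the battlefield".toList
  let abilities := (PySem.Chars.splitOn t ". ".toList).map (fun ab => PySem.Chars.splitOn ab " ".toList)
  let r := pvLoopB abilities size
  (String.ofList r.1, r.2)

-- ===== PRECONDITION & SPEC =====
-- Pre_ excludes exactly the sizes absent from the font tables, on which the Python A
-- raises KeyError (sizes_x[612][size]); for every size in the tables A returns.
def Pre_format_abilities (text : String) (size : Int) : Prop :=
  size ∈ ([40, 36, 32, 28, 24, 20, 16, 12, 8] : List Int)
instance (text : String) (size : Int) : Decidable (Pre_format_abilities text size) := by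
  unfold Pre_format_abilities; infer_instance

def pvWitness_format_abilities : String × Int := ("Flying. ~ ETBs tapped", 40)

def Spec_format_abilities (text : String) (size : Int) (out : String × Int) : Prop :=
  out = format_abilities_alt text size
instance (text : String) (size : Int) (out : String × Int) :
    Decidable (Spec_format_abilities text size out) := by
  unfold Spec_format_abilities; infer_instance

-- ===== CLAIM (what is proved, stated in full; the proofs are below) =====
def Claim_equal_format_abilities : Prop :=
  ∀ (text : String) (size : Int), Dom_format_abilities text size →
    Pre_format_abilities text size →
    Spec_format_abilities text size (format_abilities text size)

-- ===== LEMMAS AND PROOFS =====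

-- the greedy wrap of one ability, as a direct recursion: (emitted text, extra lines, final n_chars)
def pvG (maxc : Int) (n : Int) : List (List Char) → List Char × Int × Int
  | [] => ([], 0, n)
  | w :: ws =>
    if (w.length : Int) + n > maxc then
      let r := pvG maxc ((w.length : Int) + 1) ws
      (['\n'] ++ w ++ [' '] ++ r.1, r.2.1 + 1, r.2.2)
    else
      let r := pvG maxc (n + (w.length : Int) + 1) ws
      (w ++ [' '] ++ r.1, r.2.1, r.2.2)

-- rendering of one chunk / of a chunk list, as B's port renders them
def pvRc (c : List (List Char)) : List Char := (c.map (fun w => w ++ [' '])).flatten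
def pvRender (cs : List (List (List Char))) : List Char := (cs.map (fun c => pvRc c ++ ['\n'])).flatten

theorem pvJoin_nil_eq_flatten (ps : List (List Char)) :
    PySem.Chars.join [] ps = ps.flatten := by
  show List.intercalate [] ps = ps.flatten
  induction ps with
  | nil => rfl
  | cons p ps ih =>
    cases ps with
    | nil => simp [List.intercalate]
    | cons q qs => simp [List.intercalate, List.intersperse] at *; simpa using ih

-- A's inner fold computes pvG
theorem pvAbilityA_eq (maxc : Int) (ws : List (List Char)) :
    ∀ (res : List Char) (lines n : Int),
      pvAbilityA maxc (res, lines, n) ws =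
        (res ++ (pvG maxc n ws).1, lines + (pvG maxc n ws).2.1, (pvG maxc n ws).2.2) := by
  induction ws with
  | nil => intro res lines n; simp [pvAbilityA, pvG]
  | cons w ws ih =>
    intro res lines n
    by_cases h : (w.length : Int) + n > maxc
    · simp only [pvAbilityA, List.foldl_cons, pvG, if_pos h] at *
      rw [ih]
      exact Prod.ext (by simp) (Prod.ext (by simp; ring) (by simp))
    · simp only [pvAbilityA, List.foldl_cons, pvG, if_neg h] at *
      rw [ih]
      exact Prod.ext (by simp) (Prod.ext (by simp) (by simp))

-- B's chunk fold renders and counts as pvG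
theorem pvChunkFold_eq (maxc : Int) (ws : List (List Char)) :
    ∀ (done : List (List (List Char))) (cur : List (List Char)) (n : Int),
      pvRender (ws.foldl (pvStepC maxc) (done, cur, n)).1
          ++ pvRc (ws.foldl (pvStepC maxc) (done, cur, n)).2.1
        = pvRender done ++ pvRc cur ++ (pvG maxc n ws).1
      ∧ ((ws.foldl (pvStepC maxc) (done, cur, n)).1.length : Int)
        = done.length + (pvG maxc n ws).2.1 := by
  induction ws with
  | nil => intro done cur n; simp [pvG]
  | cons w ws ih =>
    intro done cur n
    by_cases h : (w.length : Int) + n > maxc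
    · simp only [List.foldl_cons, pvStepC, if_pos h, pvG]
      obtain ⟨h1, h2⟩ := ih (done ++ [cur]) ([] ++ [w]) (0 + (w.length : Int) + 1)
      constructor
      · rw [h1]; simp [pvRender, pvRc]
      · rw [h2]; simp; ring
    · simp only [List.foldl_cons, pvStepC, if_neg h, pvG]
      obtain ⟨h1, h2⟩ := ih done (cur ++ [w]) (n + (w.length : Int) + 1)
      constructor
      · rw [h1]; simp [pvRc]
      · rw [h2]

theorem pvRender_append_singleton (cs : List (List (List Char))) (c : List (List Char)) :
    pvRender (cs ++ [c]) = pvRender cs ++ (pvRc c ++ ['\n']) := by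
  simp [pvRender]

-- flatten-of-flatten: rendering all chunks at once = rendering per ability
theorem pvRender_flatten (chs : List (List (List (List Char)))) :
    ((chs.flatten).map (fun c => pvRc c ++ ['\n'])).flatten = (chs.map pvRender).flatten := by
  induction chs with
  | nil => rfl
  | cons ch chs ih => simp [pvRender] at *; exact ih

-- B's _chunk of one ability renders to pvG's text plus the ability-final newline
theorem pvChunk_render (maxc : Int) (ws : List (List Char)) :
    pvRender (pvChunk ws maxc) = (pvG maxc 0 ws).1 ++ ['\n']
    ∧ ((pvChunk ws maxc).length : Int) = (pvG maxc 0 ws).2.1 + 1 := by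
  obtain ⟨h1, h2⟩ := pvChunkFold_eq maxc ws [] [] 0
  simp only [pvRender, pvRc, List.map_nil, List.flatten_nil, List.nil_append] at h1
  unfold pvChunk
  constructor
  · show pvRender (_ ++ [_]) = _
    rw [pvRender_append_singleton, ← List.append_assoc]
    rw [show pvRender (List.foldl (pvStepC maxc) ([], [], 0) ws).1
          ++ pvRc (List.foldl (pvStepC maxc) ([], [], 0) ws).2.1 = (pvG maxc 0 ws).1 from h1]
  · simpa using h2

-- A's wrap fold, from any accumulator
theorem pvWrapA_fold (maxc : Int) (words : List (List (List Char))) :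
    ∀ (R : List Char) (L : Int),
      words.foldl (fun acc ability =>
          let inner := pvAbilityA maxc (acc.1, acc.2, 0) ability
          (inner.1 ++ ['\n'], inner.2.1 + 1)) (R, L)
        = (R ++ (words.map (fun a => (pvG maxc 0 a).1 ++ ['\n'])).flatten,
           L + (words.map (fun a => (pvG maxc 0 a).2.1 + 1)).sum) := by
  induction words with
  | nil => intro R L; simp
  | cons a as ih =>
    intro R L
    simp only [List.foldl_cons, pvAbilityA_eq maxc a R L 0]
    rw [ih]
    exact Prod.ext (by simp) (by simp; ring)

-- the two wraps agree: A's accumulation = B's chunk-then-render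
theorem pvBody_eq (maxc : Int) (words : List (List (List Char))) :
    pvWrapA maxc words
      = (PySem.Chars.join []
           (((words.map (fun a => pvChunk a maxc)).flatten).map
             (fun c => PySem.Chars.join [] (c.map (fun w => w ++ [' '])) ++ ['\n'])),
         ((words.map (fun a => pvChunk a maxc)).map (fun ch => (ch.length : Int))).sum) := by
  rw [pvWrapA, pvWrapA_fold]
  have hmap1 : (fun a => pvRender (pvChunk a maxc)) = fun a => (pvG maxc 0 a).1 ++ ['\n'] :=
    funext fun a => (pvChunk_render maxc a).1
  have hmap2 : (fun a => ((pvChunk a maxc).length : Int)) = fun a => (pvG maxc 0 a).2.1 + 1 :=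
    funext fun a => (pvChunk_render maxc a).2
  refine Prod.ext ?_ ?_
  · show (words.map (fun a => (pvG maxc 0 a).1 ++ ['\n'])).flatten = _
    simp only [pvJoin_nil_eq_flatten]
    have : (fun c => (c.map (fun w => w ++ [' '])).flatten ++ ['\n'])
         = (fun c => pvRc c ++ ['\n']) := rfl
    rw [this, pvRender_flatten, List.map_map]
    show _ = (words.map (fun a => pvRender (pvChunk a maxc))).flatten
    rw [hmap1]
  · show _ = (((words.map (fun a => pvChunk a maxc)).map (fun ch => ((ch.length : Int)))).sum)
    rw [List.map_map]
    show (0 : Int) + _ = (words.map (fun a => ((pvChunk a maxc).length : Int))).sum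
    rw [hmap2]; ring

theorem pvMain : ∀ (k : Nat) (text : String) (size : Int), (size - 8).toNat = k →
    Pre_format_abilities text size →
    format_abilities text size = format_abilities_alt text size := by
  intro k
  induction k using Nat.strong_induction_on with
  | _ k ih =>
    intro text size hk hpre
    rw [format_abilities, format_abilities_alt, pvLoopB]
    rw [show (PySem.Dict.get? pvSizesX 612).getD PySem.Dict.empty = pvCharsPerLine from by decide]
    rw [show pvSizesY = pvMaxLines from rfl]
    set words := (List.map (fun ab => PySem.Chars.splitOn ab " ".toList)
      (PySem.Chars.splitOn
        (PySem.Chars.replace (PySem.Chars.replace text.toList "~".toList "CARDNAME".toList)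
          "ETBs".toList "enters the battlefield".toList) ". ".toList)) with hwords
    have hbody := pvBody_eq ((PySem.Dict.get? pvCharsPerLine size).getD 0) words
    have h1 : PySem.Chars.join []
        (((words.map (fun a => pvChunk a ((PySem.Dict.get? pvCharsPerLine size).getD 0))).flatten).map
          (fun c => PySem.Chars.join [] (c.map (fun w => w ++ [' '])) ++ ['\n']))
        = (pvWrapA ((PySem.Dict.get? pvCharsPerLine size).getD 0) words).1 := by rw [hbody]
    have h2 : ((words.map (fun a => pvChunk a ((PySem.Dict.get? pvCharsPerLine size).getD 0))).map
          (fun ch => (ch.length : Int))).sum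
        = (pvWrapA ((PySem.Dict.get? pvCharsPerLine size).getD 0) words).2 := by rw [hbody]
    rw [h1, h2]
    split_ifs with hA hB
    · exact absurd hB (by omega)
    · have hpre' : Pre_format_abilities text (size - 4) := by
        simp only [Pre_format_abilities, List.mem_cons, List.not_mem_nil, or_false] at hpre ⊢
        omega
      rw [ih ((size - 4) - 8).toNat (by omega) text (size - 4) rfl hpre']
      rw [format_abilities_alt, ← hwords]
    · rfl
    · exact absurd hA (by omega)

theorem format_abilities_spec : Claim_equal_format_abilities := by
  intro text size _ hpre
  show format_abilities text size = format_abilities_alt text size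
  exact pvMain ((size - 8).toNat) text size rfl hpre
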